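-- pv_equiv track=rewrite | github.com/chiitata/cp-training | atcoder/abc410/e/main.py | max_monsters
-- ===== SOURCE A (Python) =====
-- def max_monsters(H, M, A, B):
--     N = len(A)
--     # dp[h][m] = i体目まで生き残れるか
--     dp = [[False] * (M + 1) for _ in range(H + 1)]
--     dp[H][M] = True
--
--     for i in range(N):
--         new_dp = [[False] * (M + 1) for _ in range(H + 1)]
--         for h in range(H + 1):
--             for m in range(M + 1):
--                 if not dp[h][m]:
--                     continue
--                 # 行動1：体力を使って戦う
--                 if h >= A[i]:
--                     new_dp[h - A[i]][m] = True
--                 # 行動2：魔力を使って戦う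
--                 if m >= B[i]:
--                     new_dp[h][m - B[i]] = True
--         if all(not cell for row in new_dp for cell in row):
--             # どの状態でも生き残れなかったらゲーム終了
--             return i
--         dp = new_dp  # 状態更新
--     return N  # 全部倒せた
-- ===== SOURCE B (Python) =====
-- def max_monsters(H, M, A, B):
--     # min-health DP: drop the health dimension; g[m] = least health spent
--     # over all surviving play sequences that leave m magic, or INF if none.
--     INF = H + 1
--     g = [INF] * M + [0]
--     for i in range(len(A)):
--         a, b = A[i], B[i]
--         g = [_best(g, m, a, b, H, M, INF) for m in range(M + 1)]
--         if min(g) > H: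
--             return i
--     return len(A)
--
-- def _best(g, m, a, b, H, M, INF):
--     c1 = g[m] + a if g[m] + a <= H else INF
--     c2 = g[m + b] if 0 <= m + b <= M else INF
--     return min(c1, c2)
-- ===== Notes on version B (the rewrite author's own statement) =====
-- stated objective: faster
-- what changed: Replaces the (H+1)x(M+1) boolean reachability matrix recomputed per monster with a length-(M+1) array holding, per remaining magic, the minimum health spent (INF = H+1 if unreachable), dropping the health dimension of the DP.
-- outside the precondition, e.g. on max_monsters(1, 0, [1, -1], [1, 0]): A returns 2, B returns 2; on max_monsters(0, 0, [1, 2], [1]): A returns 0, B returns 0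
import Mathlib
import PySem

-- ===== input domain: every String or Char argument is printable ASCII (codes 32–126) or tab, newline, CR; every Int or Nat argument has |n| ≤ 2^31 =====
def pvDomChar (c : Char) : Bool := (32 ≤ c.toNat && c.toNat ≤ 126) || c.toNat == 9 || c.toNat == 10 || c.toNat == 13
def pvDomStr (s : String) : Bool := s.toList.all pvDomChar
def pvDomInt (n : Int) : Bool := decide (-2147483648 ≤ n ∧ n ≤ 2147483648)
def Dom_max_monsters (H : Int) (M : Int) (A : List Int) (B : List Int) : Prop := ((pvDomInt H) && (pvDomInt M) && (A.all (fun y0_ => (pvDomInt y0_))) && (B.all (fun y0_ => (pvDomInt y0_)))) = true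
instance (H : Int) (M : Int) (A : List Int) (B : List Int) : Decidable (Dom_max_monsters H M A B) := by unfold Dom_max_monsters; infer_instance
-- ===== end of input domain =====

-- B replaces A's O(N*H*M) boolean reachability matrix over (health, magic) by an
-- O(N*M) DP storing, per remaining magic, the minimum health spent (objective: faster).

-- ===== PORT A =====
-- dp[h][m]; the indices the loops produce are in range under Pre_
def pvRead (dp : List (List Bool)) (h m : Nat) : Bool := (dp.getD h []).getD m false

-- new_dp[h][m] = True; under Pre_ every write index is in range (List.modify/List.set
-- are no-ops out of range, where the Python would raise — such inputs are outside Pre_)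
def pvSet (dp : List (List Bool)) (h m : Nat) : List (List Bool) :=
  dp.modify h (fun row => row.set m true)

-- [[False] * (M + 1) for _ in range(H + 1)]
def pvZero (H M : Int) : List (List Bool) :=
  (List.range (H + 1).toNat).map (fun _ => List.replicate (M + 1).toNat false)

-- the body of the innermost loop: the two guarded writes for one surviving state
-- (h, m); the Python's intermediate new_dp (after the first write) is spelled out twice
def pvCell (dp : List (List Bool)) (a b : Int) (h m : Nat) (nd : List (List Bool)) : List (List Bool) :=
  if pvRead dp h m then
    if b ≤ (m : Int) then
      pvSet (if a ≤ (h : Int) then pvSet nd ((h : Int) - a).toNat m else nd) h ((m : Int) - b).toNat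
    else
      if a ≤ (h : Int) then pvSet nd ((h : Int) - a).toNat m else nd
  else nd

-- `for m in range(M + 1): ...` for one h
def pvRowLoop (M : Int) (dp : List (List Bool)) (a b : Int) (h : Nat) (nd : List (List Bool)) : List (List Bool) :=
  (List.range (M + 1).toNat).foldl (fun nd m => pvCell dp a b h m nd) nd

-- the two nested loops of one `for i in range(N)` iteration, filling new_dp
def pvStepA (H M a b : Int) (dp : List (List Bool)) : List (List Bool) :=
  (List.range (H + 1).toNat).foldl (fun nd h => pvRowLoop M dp a b h nd) (pvZero H M)

-- the `for i in range(N)` loop; monsters fed as (A[i], B[i]) pairs (B is only ever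
-- read at i < len(A); a B shorter than A raises in Python and is outside Pre_)
def pvGoA (H M : Int) : List (Int × Int) → Nat → List (List Bool) → Int
  | [], i, _ => (i : Int)
  | (a, b) :: rest, i, dp =>
      let nd := pvStepA H M a b dp
      if nd.all (fun row => row.all (fun cell => !cell)) then (i : Int)
      else pvGoA H M rest (i + 1) nd

def max_monsters (H : Int) (M : Int) (A : List Int) (B : List Int) : Int :=
  pvGoA H M (A.zip B) 0 (pvSet (pvZero H M) H.toNat M.toNat)

-- ===== PORT B =====
-- _best: least health spent to be left with m magic after this monster
def pvBest (g : List Int) (m : Nat) (a b H M INF : Int) : Int :=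
  let c1 := if g.getD m 0 + a ≤ H then g.getD m 0 + a else INF
  let c2 := if 0 ≤ (m : Int) + b ∧ (m : Int) + b ≤ M then g.getD ((m : Int) + b).toNat 0 else INF
  min c1 c2

-- g = [_best(g, m, a, b, H, M, INF) for m in range(M + 1)]
def pvStepB (H M a b : Int) (g : List Int) : List Int :=
  (List.range (M + 1).toNat).map (fun m => pvBest g m a b H M (H + 1))

def pvGoB (H M : Int) : List (Int × Int) → Nat → List Int → Int
  | [], i, _ => (i : Int)
  | (a, b) :: rest, i, g =>
      let g' := pvStepB H M a b g
      match PySem.List.min? g' (fun x => x) with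
      | none => (i : Int)   -- min([]) raises in Python; unreachable under Pre_ (M ≥ 0)
      | some v => if H < v then (i : Int) else pvGoB H M rest (i + 1) g'

def max_monsters_alt (H : Int) (M : Int) (A : List Int) (B : List Int) : Int :=
  pvGoB H M (A.zip B) 0 (List.replicate M.toNat (H + 1) ++ [0])

-- ===== PRECONDITION & SPEC =====
-- Pre_ excludes negative H/M and lists with a negative cost or with B shorter than A,
-- on which A's list indexing generally raises IndexError; on the few such inputs where
-- the raising index happens never to be reached A still returns, and those are excluded too.
def Pre_max_monsters (H : Int) (M : Int) (A : List Int) (B : List Int) : Prop :=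
  0 ≤ H ∧ 0 ≤ M ∧ A.length ≤ B.length ∧ (∀ a ∈ A, 0 ≤ a) ∧ (∀ b ∈ B.take A.length, 0 ≤ b)
instance (H : Int) (M : Int) (A : List Int) (B : List Int) : Decidable (Pre_max_monsters H M A B) := by unfold Pre_max_monsters; infer_instance

def pvWitness_max_monsters : Int × Int × List Int × List Int := (3, 2, [1, 2], [1, 1])

def Spec_max_monsters (H : Int) (M : Int) (A : List Int) (B : List Int) (out : Int) : Prop := out = max_monsters_alt H M A B
instance (H : Int) (M : Int) (A : List Int) (B : List Int) (out : Int) : Decidable (Spec_max_monsters H M A B out) := by unfold Spec_max_monsters; infer_instance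

-- ===== CLAIM (what is proved, stated in full; the proofs are below) =====
def Claim_equal_max_monsters : Prop := ∀ (H : Int) (M : Int) (A : List Int) (B : List Int), Dom_max_monsters H M A B → Pre_max_monsters H M A B → Spec_max_monsters H M A B (max_monsters H M A B)

-- ===== LEMMAS AND PROOFS =====

-- rectangular shape of A's matrix
def pvWF (H M : Int) (dp : List (List Bool)) : Prop :=
  dp.length = (H + 1).toNat ∧ ∀ row ∈ dp, row.length = (M + 1).toNat

-- the invariant tying A's matrix to B's list: per magic column, either the column is
-- empty and g[m] = H + 1, or g[m] = H - (greatest surviving health in the column)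
def pvInv (H M : Int) (dp : List (List Bool)) (g : List Int) : Prop :=
  0 ≤ H ∧ 0 ≤ M ∧ pvWF H M dp ∧ g.length = (M + 1).toNat ∧
  ∀ m < (M + 1).toNat,
    (g.getD m 0 = H + 1 ∧ ∀ x, pvRead dp x m = false) ∨
    (0 ≤ g.getD m 0 ∧ g.getD m 0 ≤ H ∧ pvRead dp (H - g.getD m 0).toNat m = true ∧
      ∀ x, pvRead dp x m = true → (x : Int) ≤ H - g.getD m 0)

theorem pvRead_eq (dp : List (List Bool)) (x y : Nat) :
    pvRead dp x y = (dp[x]?.getD [])[y]?.getD false := by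
  simp only [pvRead, List.getD_eq_getElem?_getD]

theorem pvWF_zero (H M : Int) : pvWF H M (pvZero H M) := by
  constructor
  · simp [pvZero]
  · intro row hrow
    simp [pvZero] at hrow
    obtain ⟨_, _, rfl⟩ := hrow
    simp

theorem pvRead_zero (H M : Int) (x y : Nat) : pvRead (pvZero H M) x y = false := by
  rw [pvRead_eq]
  unfold pvZero
  rcases Nat.lt_or_ge x (H + 1).toNat with hx | hx
  · rw [List.getElem?_map, List.getElem?_range hx]
    simp only [Option.map_some, Option.getD_some, List.getElem?_replicate]
    split <;> simp
  · have hnone : ((List.range (H + 1).toNat).map (fun _ => List.replicate (M + 1).toNat false))[x]? = none :=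
      List.getElem?_eq_none (by simp; omega)
    rw [hnone]
    simp

theorem pvRead_bound (H M : Int) (dp : List (List Bool)) (x y : Nat) (hwf : pvWF H M dp)
    (hxy : pvRead dp x y = true) : x < (H + 1).toNat ∧ y < (M + 1).toNat := by
  obtain ⟨hl, hr⟩ := hwf
  rw [pvRead_eq] at hxy
  cases hr0 : dp[x]? with
  | none => rw [hr0, Option.getD_none] at hxy; simp at hxy
  | some r =>
      have hrl := hr r (List.mem_of_getElem? hr0)
      have hxlen : x < dp.length := by
        by_contra hc
        rw [List.getElem?_eq_none (by omega)] at hr0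
        simp at hr0
      rw [hr0, Option.getD_some] at hxy
      cases hc2 : r[y]? with
      | none => rw [hc2, Option.getD_none] at hxy; simp at hxy
      | some cbit =>
          have hylen : y < r.length := by
            by_contra hc
            rw [List.getElem?_eq_none (by omega)] at hc2
            simp at hc2
          exact ⟨by omega, by omega⟩

theorem pvWF_set (H M : Int) (dp : List (List Bool)) (h m : Nat) (hwf : pvWF H M dp) :
    pvWF H M (pvSet dp h m) := by
  obtain ⟨hl, hr⟩ := hwf
  refine ⟨by simpa [pvSet, List.length_modify] using hl, ?_⟩
  intro row hrow
  unfold pvSet at hrow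
  rw [List.mem_iff_getElem?] at hrow
  obtain ⟨j, hj⟩ := hrow
  rw [List.getElem?_modify] at hj
  cases hc : dp[j]? with
  | none =>
      rw [hc, Option.map_eq_map, Option.map_none] at hj
      simp at hj
  | some r =>
      rw [hc, Option.map_eq_map, Option.map_some] at hj
      have hrr : r ∈ dp := List.mem_of_getElem? hc
      have hlen := hr r hrr
      injection hj with hj
      split at hj <;> simp [← hj, List.length_set, hlen]

theorem pvRead_set (H M : Int) (dp : List (List Bool)) (h m x y : Nat) (hwf : pvWF H M dp)
    (hh : h < (H + 1).toNat) (hm : m < (M + 1).toNat) :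
    (pvRead (pvSet dp h m) x y = true ↔ pvRead dp x y = true ∨ (x = h ∧ y = m)) := by
  obtain ⟨hl, hr⟩ := hwf
  rw [pvRead_eq, pvRead_eq]
  unfold pvSet
  rw [List.getElem?_modify]
  by_cases hx : h = x
  · subst hx
    have hhl : h < dp.length := by omega
    have hr0 : dp[h]? = some dp[h] := List.getElem?_eq_getElem hhl
    have hrlen : (dp[h]).length = (M + 1).toNat := hr _ (List.getElem_mem hhl)
    rw [hr0]
    simp only [Option.map_eq_map, Option.map_some, Option.getD_some]
    rw [if_pos (by trivial), List.getElem?_set]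
    by_cases hy : m = y
    · subst hy
      rw [if_pos rfl, if_pos (show m < (dp[h]).length by omega)]
      simp
    · rw [if_neg hy]
      constructor
      · exact Or.inl
      · rintro (hc | ⟨-, rfl⟩)
        · exact hc
        · exact absurd rfl hy
  · cases hc : dp[x]? with
    | none =>
        simp only [Option.map_eq_map, Option.map_none, Option.getD_none]
        constructor
        · intro hfalse; simp at hfalse
        · rintro (hfalse | ⟨rfl, -⟩)
          · simp at hfalse
          · exact absurd rfl hx
    | some r =>
        simp only [Option.map_eq_map, Option.map_some, Option.getD_some]
        rw [if_neg hx]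
        constructor
        · exact Or.inl
        · rintro (hc' | ⟨rfl, -⟩)
          · exact hc'
          · exact absurd rfl hx

-- successful transition of A's step from surviving state (h, m) to new cell (x, y)
def pvTrans (dp : List (List Bool)) (a b : Int) (h m x y : Nat) : Prop :=
  pvRead dp h m = true ∧
    ((a ≤ (h : Int) ∧ (x : Int) = (h : Int) - a ∧ y = m) ∨
     (b ≤ (m : Int) ∧ x = h ∧ (y : Int) = (m : Int) - b))

theorem pvCell_char (H M a b : Int) (dp nd : List (List Bool)) (h m : Nat)
    (hwf : pvWF H M nd) (ha : 0 ≤ a) (hb : 0 ≤ b)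
    (hh : h < (H + 1).toNat) (hm : m < (M + 1).toNat) :
    pvWF H M (pvCell dp a b h m nd) ∧
    ∀ x y, (pvRead (pvCell dp a b h m nd) x y = true ↔
      pvRead nd x y = true ∨ pvTrans dp a b h m x y) := by
  unfold pvCell
  cases hdp : pvRead dp h m with
  | false =>
      rw [if_neg (by simp)]
      refine ⟨hwf, fun x y => ?_⟩
      unfold pvTrans
      simp [hdp]
  | true =>
      rw [if_pos rfl]
      have hi1 : ((h : Int) - a).toNat < (H + 1).toNat := by omega
      have hj2 : ((m : Int) - b).toNat < (M + 1).toNat := by omega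
      by_cases hB : b ≤ (m : Int) <;> by_cases hA : a ≤ (h : Int)
      · rw [if_pos hB, if_pos hA]
        have hwf1 := pvWF_set H M nd ((h : Int) - a).toNat m hwf
        refine ⟨pvWF_set H M _ h ((m : Int) - b).toNat hwf1, ?_⟩
        intro x y
        rw [pvRead_set H M _ h ((m : Int) - b).toNat x y hwf1 hh hj2,
            pvRead_set H M nd ((h : Int) - a).toNat m x y hwf hi1 hm]
        unfold pvTrans
        constructor
        · rintro ((hc | ⟨rfl, rfl⟩) | ⟨rfl, rfl⟩)
          · exact Or.inl hc
          · exact Or.inr ⟨hdp, Or.inl ⟨hA, by omega, rfl⟩⟩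
          · exact Or.inr ⟨hdp, Or.inr ⟨hB, rfl, by omega⟩⟩
        · rintro (hc | ⟨-, (⟨-, hx, rfl⟩ | ⟨-, rfl, hy⟩)⟩)
          · exact Or.inl (Or.inl hc)
          · exact Or.inl (Or.inr ⟨by omega, rfl⟩)
          · exact Or.inr ⟨rfl, by omega⟩
      · rw [if_pos hB, if_neg hA]
        have hwf1 := pvWF_set H M nd h ((m : Int) - b).toNat hwf
        refine ⟨hwf1, ?_⟩
        intro x y
        rw [pvRead_set H M nd h ((m : Int) - b).toNat x y hwf hh hj2]
        unfold pvTrans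
        constructor
        · rintro (hc | ⟨rfl, rfl⟩)
          · exact Or.inl hc
          · exact Or.inr ⟨hdp, Or.inr ⟨hB, rfl, by omega⟩⟩
        · rintro (hc | ⟨-, (⟨hA', -, -⟩ | ⟨-, rfl, hy⟩)⟩)
          · exact Or.inl hc
          · exact absurd hA' hA
          · exact Or.inr ⟨rfl, by omega⟩
      · rw [if_neg hB, if_pos hA]
        have hwf1 := pvWF_set H M nd ((h : Int) - a).toNat m hwf
        refine ⟨hwf1, ?_⟩
        intro x y
        rw [pvRead_set H M nd ((h : Int) - a).toNat m x y hwf hi1 hm]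
        unfold pvTrans
        constructor
        · rintro (hc | ⟨rfl, rfl⟩)
          · exact Or.inl hc
          · exact Or.inr ⟨hdp, Or.inl ⟨hA, by omega, rfl⟩⟩
        · rintro (hc | ⟨-, (⟨-, hx, rfl⟩ | ⟨hB', -, -⟩)⟩)
          · exact Or.inl hc
          · exact Or.inr ⟨by omega, rfl⟩
          · exact absurd hB' hB
      · rw [if_neg hB, if_neg hA]
        refine ⟨hwf, ?_⟩
        intro x y
        unfold pvTrans
        constructor
        · exact Or.inl
        · rintro (hc | ⟨-, (⟨hA', -, -⟩ | ⟨hB', -, -⟩)⟩)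
          · exact hc
          · exact absurd hA' hA
          · exact absurd hB' hB

theorem pvRowLoop_char (H M a b : Int) (dp : List (List Bool)) (h : Nat)
    (ha : 0 ≤ a) (hb : 0 ≤ b) (hh : h < (H + 1).toNat) :
    ∀ (ms : List Nat) (nd : List (List Bool)), pvWF H M nd → (∀ m ∈ ms, m < (M + 1).toNat) →
    pvWF H M (ms.foldl (fun nd m => pvCell dp a b h m nd) nd) ∧
    ∀ x y, (pvRead (ms.foldl (fun nd m => pvCell dp a b h m nd) nd) x y = true ↔
      pvRead nd x y = true ∨ ∃ m ∈ ms, pvTrans dp a b h m x y) := by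
  intro ms
  induction ms with
  | nil =>
      intro nd hwf _
      refine ⟨hwf, fun x y => ?_⟩
      simp
  | cons m ms ih =>
      intro nd hwf hms
      have hm : m < (M + 1).toNat := hms m (by simp)
      obtain ⟨hwf1, hchar1⟩ := pvCell_char H M a b dp nd h m hwf ha hb hh hm
      obtain ⟨hwf2, hchar2⟩ := ih (pvCell dp a b h m nd) hwf1 (fun m' hm' => hms m' (by simp [hm']))
      rw [List.foldl_cons]
      refine ⟨hwf2, ?_⟩
      intro x y
      rw [hchar2 x y, hchar1 x y]
      simp only [List.mem_cons]
      constructor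
      · rintro ((hc | ht) | ⟨m', hm', ht⟩)
        · exact Or.inl hc
        · exact Or.inr ⟨m, Or.inl rfl, ht⟩
        · exact Or.inr ⟨m', Or.inr hm', ht⟩
      · rintro (hc | ⟨m', (rfl | hm'), ht⟩)
        · exact Or.inl (Or.inl hc)
        · exact Or.inl (Or.inr ht)
        · exact Or.inr ⟨m', hm', ht⟩

theorem pvStepA_char (H M a b : Int) (dp : List (List Bool)) (hwf : pvWF H M dp)
    (ha : 0 ≤ a) (hb : 0 ≤ b) :
    pvWF H M (pvStepA H M a b dp) ∧
    ∀ x y, (pvRead (pvStepA H M a b dp) x y = true ↔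
      ∃ h < (H + 1).toNat, ∃ m < (M + 1).toNat, pvTrans dp a b h m x y) := by
  unfold pvStepA
  suffices hgen : ∀ (hs : List Nat) (nd : List (List Bool)), pvWF H M nd →
      (∀ h ∈ hs, h < (H + 1).toNat) →
      pvWF H M (hs.foldl (fun nd h => pvRowLoop M dp a b h nd) nd) ∧
      ∀ x y, (pvRead (hs.foldl (fun nd h => pvRowLoop M dp a b h nd) nd) x y = true ↔
        pvRead nd x y = true ∨ ∃ h ∈ hs, ∃ m < (M + 1).toNat, pvTrans dp a b h m x y) by
    obtain ⟨hwf', hchar⟩ := hgen (List.range (H + 1).toNat) (pvZero H M) (pvWF_zero H M)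
      (fun h hh => List.mem_range.mp hh)
    refine ⟨hwf', ?_⟩
    intro x y
    rw [hchar x y, pvRead_zero]
    simp [List.mem_range]
  intro hs
  induction hs with
  | nil =>
      intro nd hwf _
      refine ⟨hwf, fun x y => ?_⟩
      simp
  | cons h hs ih =>
      intro nd hwf hhs
      have hh : h < (H + 1).toNat := hhs h (by simp)
      obtain ⟨hwf1, hchar1⟩ := pvRowLoop_char H M a b dp h ha hb hh
        (List.range (M + 1).toNat) nd hwf (fun m hm => List.mem_range.mp hm)
      obtain ⟨hwf2, hchar2⟩ := ih (pvRowLoop M dp a b h nd) hwf1 (fun h' hh' => hhs h' (by simp [hh']))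
      rw [List.foldl_cons]
      refine ⟨hwf2, ?_⟩
      intro x y
      rw [hchar2 x y]
      unfold pvRowLoop
      rw [hchar1 x y]
      simp only [List.mem_cons, List.mem_range]
      constructor
      · rintro ((hc | ⟨m, hm, ht⟩) | ⟨h', hh', m, hm, ht⟩)
        · exact Or.inl hc
        · exact Or.inr ⟨h, Or.inl rfl, m, hm, ht⟩
        · exact Or.inr ⟨h', Or.inr hh', m, hm, ht⟩
      · rintro (hc | ⟨h', (rfl | hh'), m, hm, ht⟩)
        · exact Or.inl (Or.inl hc)
        · exact Or.inl (Or.inr ⟨m, hm, ht⟩)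
        · exact Or.inr ⟨h', hh', m, hm, ht⟩

theorem pvStepB_getD (H M a b : Int) (g : List Int) (m : Nat) (hm : m < (M + 1).toNat) :
    (pvStepB H M a b g).getD m 0 = pvBest g m a b H M (H + 1) := by
  unfold pvStepB
  rw [List.getD_eq_getElem?_getD, List.getElem?_map, List.getElem?_range hm]
  rfl

theorem pvInv_step (H M a b : Int) (dp : List (List Bool)) (g : List Int)
    (hinv : pvInv H M dp g) (ha : 0 ≤ a) (hb : 0 ≤ b) :
    pvInv H M (pvStepA H M a b dp) (pvStepB H M a b g) := by
  obtain ⟨hH, hM, hwf, hglen, hcol⟩ := hinv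
  obtain ⟨hwf', hchar⟩ := pvStepA_char H M a b dp hwf ha hb
  refine ⟨hH, hM, hwf', by simp [pvStepB], ?_⟩
  intro m hm
  rw [pvStepB_getD H M a b g m hm]
  have hmM : (m : Int) ≤ M := by omega
  set mb : Nat := ((m : Int) + b).toNat with hmbdef
  have hmbI : (mb : Int) = (m : Int) + b := by omega
  -- characterisation of the new column m
  have hcolchar : ∀ x, (pvRead (pvStepA H M a b dp) x m = true ↔
      (∃ h : Nat, pvRead dp h m = true ∧ a ≤ (h : Int) ∧ (x : Int) = (h : Int) - a) ∨
      ((m : Int) + b ≤ M ∧ pvRead dp x mb = true)) := by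
    intro x
    rw [hchar x m]
    constructor
    · rintro ⟨h, hh, m', hm', htr, (⟨hA, hx, hmeq⟩ | ⟨hB, rfl, hyeq⟩)⟩
      · subst hmeq; exact Or.inl ⟨h, htr, hA, hx⟩
      · have hmbm' : m' = mb := by omega
        subst hmbm'
        exact Or.inr ⟨by omega, htr⟩
    · rintro (⟨h, htr, hA, hx⟩ | ⟨hble, htr⟩)
      · obtain ⟨hhb, -⟩ := pvRead_bound H M dp h m hwf htr
        exact ⟨h, hhb, m, hm, htr, Or.inl ⟨hA, hx, rfl⟩⟩
      · obtain ⟨hxb, hmbb⟩ := pvRead_bound H M dp x mb hwf htr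
        exact ⟨x, hxb, mb, hmbb, htr, Or.inr ⟨by omega, rfl, by omega⟩⟩
  -- the two candidates
  simp only [pvBest]
  set v : Int := g.getD m 0 with hv
  set c1 : Int := if v + a ≤ H then v + a else H + 1 with hc1def
  set c2 : Int := if 0 ≤ (m : Int) + b ∧ (m : Int) + b ≤ M then g.getD mb 0 else H + 1 with hc2def
  have hL1 : c1 ≤ H → 0 ≤ c1 ∧ pvRead (pvStepA H M a b dp) (H - c1).toNat m = true := by
    intro hle
    have hg1 : v + a ≤ H := by by_contra hc; rw [hc1def, if_neg hc] at hle; omega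
    have hc1v : c1 = v + a := by rw [hc1def, if_pos hg1]
    rcases hcol m hm with ⟨hveq, -⟩ | ⟨hv0, hvH, hwit, -⟩
    · exfalso; rw [← hv] at hveq; omega
    · rw [← hv] at hv0 hvH hwit
      refine ⟨by omega, ?_⟩
      rw [hcolchar]
      exact Or.inl ⟨(H - v).toNat, hwit, by omega, by omega⟩
  have hL2 : c2 ≤ H → 0 ≤ c2 ∧ pvRead (pvStepA H M a b dp) (H - c2).toNat m = true := by
    intro hle
    have hcnd : 0 ≤ (m : Int) + b ∧ (m : Int) + b ≤ M := by
      by_contra hc; rw [hc2def, if_neg hc] at hle; omega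
    have hc2v : c2 = g.getD mb 0 := by rw [hc2def, if_pos hcnd]
    have hmblt : mb < (M + 1).toNat := by omega
    rcases hcol mb hmblt with ⟨hveq, -⟩ | ⟨hv0, hvH, hwit, -⟩
    · exfalso; rw [← hc2v] at hveq; omega
    · rw [← hc2v] at hv0 hvH hwit
      refine ⟨by omega, ?_⟩
      rw [hcolchar]
      exact Or.inr ⟨hcnd.2, hwit⟩
  have hL3 : ∀ x, pvRead (pvStepA H M a b dp) x m = true → (x : Int) ≤ H - min c1 c2 := by
    intro x hx
    have hm1 : min c1 c2 ≤ c1 := min_le_left _ _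
    have hm2 : min c1 c2 ≤ c2 := min_le_right _ _
    rw [hcolchar] at hx
    rcases hx with ⟨h, htr, hA, hxeq⟩ | ⟨hble, htr⟩
    · rcases hcol m hm with ⟨-, hempty⟩ | ⟨hv0, hvH, -, hbound⟩
      · rw [hempty h] at htr; exact absurd htr (by simp)
      · rw [← hv] at hv0 hvH hbound
        have hhle := hbound h htr
        have hg1 : v + a ≤ H := by omega
        have hc1v : c1 = v + a := by rw [hc1def, if_pos hg1]
        omega
    · have hmblt : mb < (M + 1).toNat := by omega
      have hc2v : c2 = g.getD mb 0 := by rw [hc2def, if_pos ⟨by omega, hble⟩]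
      rcases hcol mb hmblt with ⟨-, hempty⟩ | ⟨hv0, hvH, -, hbound⟩
      · rw [hempty x] at htr; exact absurd htr (by simp)
      · rw [← hc2v] at hv0 hvH hbound
        have := hbound x htr
        omega
  by_cases hle : min c1 c2 ≤ H
  · right
    refine ⟨?_, hle, ?_, hL3⟩
    · rcases min_choice c1 c2 with hmc | hmc <;> rw [hmc]
      · exact (hL1 (hmc ▸ hle)).1
      · exact (hL2 (hmc ▸ hle)).1
    · rcases min_choice c1 c2 with hmc | hmc <;> rw [hmc]
      · exact (hL1 (hmc ▸ hle)).2
      · exact (hL2 (hmc ▸ hle)).2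
  · left
    constructor
    · have hc1gt : ¬ c1 ≤ H := fun hc => hle (le_trans (min_le_left _ _) hc)
      have hc2gt : ¬ c2 ≤ H := fun hc => hle (le_trans (min_le_right _ _) hc)
      have hc1v : c1 = H + 1 := by
        by_cases hg1 : v + a ≤ H
        · exact absurd (by rw [hc1def, if_pos hg1]; omega : c1 ≤ H) hc1gt
        · rw [hc1def, if_neg hg1]
      have hc2v : c2 = H + 1 := by
        by_cases hcnd : 0 ≤ (m : Int) + b ∧ (m : Int) + b ≤ M
        · have hmblt : mb < (M + 1).toNat := by omega
          rcases hcol mb hmblt with ⟨hveq, -⟩ | ⟨-, hvH, -, -⟩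
          · rw [hc2def, if_pos hcnd, hveq]
          · exact absurd (by rw [hc2def, if_pos hcnd]; omega : c2 ≤ H) hc2gt
        · rw [hc2def, if_neg hcnd]
      rw [hc1v, hc2v]; exact min_self _
    · intro x
      rcases Bool.eq_false_or_eq_true (pvRead (pvStepA H M a b dp) x m) with ht | hf
      · exfalso
        have := hL3 x ht
        omega
      · exact hf

theorem pvInv_empty (H M : Int) (dp : List (List Bool)) (g : List Int) (hinv : pvInv H M dp g) :
    (dp.all (fun row => row.all (fun cell => !cell)) = true ↔ ∀ v ∈ g, H < v) := by
  obtain ⟨hH, hM, ⟨hl, hr⟩, hglen, hcol⟩ := hinv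
  constructor
  · intro hall v hvmem
    rw [List.mem_iff_getElem] at hvmem
    obtain ⟨m, hmlt, hveq⟩ := hvmem
    have hmn : m < (M + 1).toNat := by omega
    have hgd : g.getD m 0 = v := by
      rw [List.getD_eq_getElem?_getD, List.getElem?_eq_getElem hmlt, Option.getD_some, hveq]
    rcases hcol m hmn with ⟨heq, -⟩ | ⟨-, -, hwit, -⟩
    · omega
    · exfalso
      rw [List.all_eq_true] at hall
      rw [pvRead_eq] at hwit
      set x := (H - g.getD m 0).toNat with hxdef
      cases hr0 : dp[x]? with
      | none => rw [hr0, Option.getD_none] at hwit; simp at hwit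
      | some r =>
          have hmem := hall r (List.mem_of_getElem? hr0)
          rw [hr0, Option.getD_some] at hwit
          cases hc2 : r[m]? with
          | none => rw [hc2, Option.getD_none] at hwit; simp at hwit
          | some cbit =>
              rw [hc2, Option.getD_some] at hwit
              have hfalse := (List.all_eq_true.mp hmem) cbit (List.mem_of_getElem? hc2)
              rw [hwit] at hfalse
              simp at hfalse
  · intro hgt
    rw [List.all_eq_true]
    intro row hrow
    rw [List.all_eq_true]
    intro c hc
    rw [List.mem_iff_getElem] at hrow hc
    obtain ⟨x, hxlt, hxeq⟩ := hrow
    obtain ⟨y, hylt, hyeq⟩ := hc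
    have hread : pvRead dp x y = c := by
      rw [pvRead_eq, List.getElem?_eq_getElem hxlt, Option.getD_some]
      subst hxeq
      rw [List.getElem?_eq_getElem hylt, Option.getD_some, hyeq]
    have hyM : y < (M + 1).toNat := by
      have := hr row (by rw [← hxeq]; exact List.getElem_mem hxlt)
      omega
    rcases hcol y hyM with ⟨-, hempty⟩ | ⟨-, hle, -, -⟩
    · have := hempty x
      rw [hread] at this
      simp [this]
    · exfalso
      have hvm : g.getD y 0 ∈ g := by
        have hyl : y < g.length := by omega
        rw [List.getD_eq_getElem?_getD, List.getElem?_eq_getElem hyl, Option.getD_some]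
        exact List.getElem_mem hyl
      have := hgt _ hvm
      omega

theorem pvGo_eq (H M : Int) (ps : List (Int × Int)) (i : Nat) (dp : List (List Bool)) (g : List Int)
    (hinv : pvInv H M dp g) (hps : ∀ p ∈ ps, 0 ≤ p.1 ∧ 0 ≤ p.2) :
    pvGoA H M ps i dp = pvGoB H M ps i g := by
  induction ps generalizing i dp g with
  | nil => rfl
  | cons p ps ih =>
      obtain ⟨a, b⟩ := p
      obtain ⟨ha, hb⟩ := hps (a, b) (by simp)
      have hinv' := pvInv_step H M a b dp g hinv ha hb
      have hemp := pvInv_empty H M _ _ hinv'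
      have hne : pvStepB H M a b g ≠ [] := by
        have hlen : (pvStepB H M a b g).length = (M + 1).toNat := by simp [pvStepB]
        intro hcon
        rw [hcon] at hlen
        simp at hlen
        have hM : 0 ≤ M := hinv.2.1
        omega
      obtain ⟨v, hmin⟩ : ∃ v, PySem.List.min? (pvStepB H M a b g) (fun x => x) = some v := by
        cases hc : PySem.List.min? (pvStepB H M a b g) (fun x => x) with
        | none => exact absurd ((PySem.List.min?_eq_none_iff _ _).mp hc) hne
        | some v => exact ⟨v, rfl⟩
      have hvmem := PySem.List.min?_mem hmin
      have hvmin := PySem.List.min?_isMin hmin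
      have hiff : ((pvStepA H M a b dp).all (fun row => row.all (fun cell => !cell)) = true) ↔ H < v := by
        rw [hemp]
        constructor
        · intro hf; exact hf v hvmem
        · intro hv y hy; exact lt_of_lt_of_le hv (hvmin y hy)
      simp only [pvGoA, pvGoB, hmin]
      by_cases hcondition : H < v
      · rw [if_pos (hiff.mpr hcondition), if_pos hcondition]
      · rw [if_neg (fun hc => hcondition (hiff.mp hc)), if_neg hcondition]
        exact ih (i + 1) _ _ hinv' (fun p hp => hps p (by simp [hp]))

theorem pvInv_init (H M : Int) (hH : 0 ≤ H) (hM : 0 ≤ M) :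
    pvInv H M (pvSet (pvZero H M) H.toNat M.toNat) (List.replicate M.toNat (H + 1) ++ [0]) := by
  have hHn : H.toNat < (H + 1).toNat := by omega
  have hMn : M.toNat < (M + 1).toNat := by omega
  have hwf0 := pvWF_zero H M
  have hread : ∀ x y, (pvRead (pvSet (pvZero H M) H.toNat M.toNat) x y = true ↔ (x = H.toNat ∧ y = M.toNat)) := by
    intro x y
    rw [pvRead_set H M _ _ _ x y hwf0 hHn hMn, pvRead_zero]
    simp
  refine ⟨hH, hM, pvWF_set H M _ _ _ hwf0, by simp; omega, ?_⟩
  intro m hm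
  have hgd : (List.replicate M.toNat (H + 1) ++ ([0] : List Int)).getD m 0 = if m < M.toNat then H + 1 else 0 := by
    by_cases hmm : m < M.toNat
    · rw [List.getD_eq_getElem?_getD, List.getElem?_append_left (by simpa using hmm)]
      simp [hmm]
    · have hmeq : m = M.toNat := by omega
      subst hmeq
      rw [List.getD_eq_getElem?_getD, List.getElem?_append_right (by simp)]
      simp
  by_cases hmm : m < M.toNat
  · left
    rw [hgd, if_pos hmm]
    refine ⟨rfl, ?_⟩
    intro x
    rcases Bool.eq_false_or_eq_true (pvRead (pvSet (pvZero H M) H.toNat M.toNat) x m) with ht | hf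
    · exfalso
      obtain ⟨-, hym⟩ := (hread x m).mp ht
      omega
    · exact hf
  · right
    have hmeq : m = M.toNat := by omega
    subst hmeq
    rw [hgd, if_neg hmm]
    have hH0 : (H - 0).toNat = H.toNat := by omega
    refine ⟨le_refl 0, hH, ?_, ?_⟩
    · rw [hH0, hread]
      exact ⟨rfl, rfl⟩
    · intro x hx
      obtain ⟨rfl, -⟩ := (hread x M.toNat).mp hx
      omega

theorem pv_zip_take (A B : List Int) : A.zip B = A.zip (B.take A.length) := by
  induction A generalizing B with
  | nil => simp
  | cons a A ih =>
      cases B with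
      | nil => simp
      | cons b B => simp [ih B]

-- ===== VERDICT (by name: the statement is the Claim_ definition above) =====
theorem max_monsters_spec : Claim_equal_max_monsters := by
  intro H M A B _ hpre
  obtain ⟨hH, hM, hlen, hA, hB⟩ := hpre
  unfold Spec_max_monsters max_monsters max_monsters_alt
  refine pvGo_eq H M (A.zip B) 0 _ _ (pvInv_init H M hH hM) ?_
  intro p hp
  rw [pv_zip_take] at hp
  obtain ⟨h1, h2⟩ := List.of_mem_zip hp
  exact ⟨hA _ h1, hB _ h2⟩
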